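-- pv_equiv track=rewrite | github.com/nimrah-14n/Hackathon-AI-Spec-Driven-Interactive-Book- | backend/src/services/hybrid_rag_service.py | check_domain_relevance
-- ===== SOURCE A (Python) =====
-- def check_domain_relevance(query: str) -> bool:
--     """
--     Check if the question relates to AI / Robotics / ML / Education
--     """
--     # Convert query to lowercase for case-insensitive matching
--     query_lower = query.lower()
--
--     # Keywords related to AI, Robotics, ML, and Education
--     ai_keywords = [
--         "artificial intelligence", "ai", "machine learning", "ml", "deep learning",
--         "neural network", "algorithm", "data science", "computer vision",
--         "natural language processing", "nlp", "reinforcement learning", "transformer",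
--         "gpt", "llm", "large language model", "neural network", "supervised learning",
--         "unsupervised learning", "reinforcement learning", "computer vision"
--     ]
--
--     robotics_keywords = [
--         "robotics", "robot", "automation", "actuator", "sensor", "servo",
--         "microcontroller", "arduino", "raspberry pi", "kinematics", "dynamics",
--         "motion planning", "path planning", "slam", "simultaneous localization",
--         "mapping", "computer vision", "robot arm", "mobile robot", "humanoid",
--         "navigation", "control system", "pid controller", "ros", "robot operating system"
--     ]
--
--     ml_keywords = [
--         "machine learning", "ml", "deep learning", "neural network", "algorithm",
--         "training", "dataset", "model", "accuracy", "precision", "recall",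
--         "f1 score", "overfitting", "underfitting", "cross validation", "feature",
--         "classification", "regression", "clustering", "svm", "decision tree",
--         "random forest", "gradient boosting", "xgboost", "tensorflow", "pytorch"
--     ]
--
--     education_keywords = [
--         "education", "learning", "course", "tutorial", "teaching", "student",
--         "curriculum", "syllabus", "academic", "scholarly", "pedagogy", "instruction",
--         "knowledge", "understanding", "concept", "theory", "principle", "study",
--         "research", "analysis", "methodology", "learning outcome", "competency"
--     ]
--
--     # Check if any of the keywords appear in the query
--     all_keywords = ai_keywords + robotics_keywords + ml_keywords + education_keywords
--
--     for keyword in all_keywords: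
--         if keyword in query_lower:
--             return True
--
--     # Additional check for broader AI/Robotics related terms
--     broad_keywords = [
--         "technology", "programming", "coding", "software", "hardware", "computing",
--         "science", "engineering", "automation", "intelligent", "autonomous",
--         "algorithmic", "computation", "digital", "smart", "intelligent system"
--     ]
--
--     for keyword in broad_keywords:
--         if keyword in query_lower:
--             # Additional context check to ensure it's related to AI/Robotics
--             if any(ai_keyword in query_lower for ai_keyword in ai_keywords + robotics_keywords + ml_keywords):
--                 return True
--
--     return False
-- ===== SOURCE B (Python) =====
-- # B scans the lowercased query position by position, dispatching on the current
-- # character into a dict that groups keywords by first letter, and tests only those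
-- # keywords as prefixes at that position (a first-character-indexed multi-pattern
-- # matcher), instead of A's one-full-substring-scan-per-keyword loops.  A's broad-
-- # keyword loop is dead code (its inner context check can only succeed when the
-- # first loop already returned True), so B has no counterpart for it.
-- _KEYWORDS = [
--     "artificial intelligence", "ai", "machine learning", "ml", "deep learning",
--     "neural network", "algorithm", "data science", "computer vision",
--     "natural language processing", "nlp", "reinforcement learning", "transformer",
--     "gpt", "llm", "large language model", "neural network", "supervised learning",
--     "unsupervised learning", "reinforcement learning", "computer vision",
--     "robotics", "robot", "automation", "actuator", "sensor", "servo",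
--     "microcontroller", "arduino", "raspberry pi", "kinematics", "dynamics",
--     "motion planning", "path planning", "slam", "simultaneous localization",
--     "mapping", "computer vision", "robot arm", "mobile robot", "humanoid",
--     "navigation", "control system", "pid controller", "ros", "robot operating system",
--     "machine learning", "ml", "deep learning", "neural network", "algorithm",
--     "training", "dataset", "model", "accuracy", "precision", "recall",
--     "f1 score", "overfitting", "underfitting", "cross validation", "feature",
--     "classification", "regression", "clustering", "svm", "decision tree",
--     "random forest", "gradient boosting", "xgboost", "tensorflow", "pytorch",
--     "education", "learning", "course", "tutorial", "teaching", "student",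
--     "curriculum", "syllabus", "academic", "scholarly", "pedagogy", "instruction",
--     "knowledge", "understanding", "concept", "theory", "principle", "study",
--     "research", "analysis", "methodology", "learning outcome", "competency",
-- ]
--
-- _BY_FIRST = {}
-- for _k in _KEYWORDS:
--     _BY_FIRST.setdefault(_k[0], []).append(_k)
--
--
-- def check_domain_relevance(query: str) -> bool:
--     q = query.lower()
--     for i in range(len(q)):
--         for k in _BY_FIRST.get(q[i], ()):
--             if q.startswith(k, i):
--                 return True
--     return False
-- ===== Notes on version B (the rewrite author's own statement) =====
-- stated objective: alternative
-- what changed: B replaces A's per-keyword substring-scan loops by a single left-to-right scan of the lowercased query that dispatches each position through a dict grouping keywords by first character and tests only those keywords as prefixes there, and drops A's broad-keyword loop, which is dead code (its inner context check can only succeed when the first loop already returned True).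
import Mathlib
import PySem

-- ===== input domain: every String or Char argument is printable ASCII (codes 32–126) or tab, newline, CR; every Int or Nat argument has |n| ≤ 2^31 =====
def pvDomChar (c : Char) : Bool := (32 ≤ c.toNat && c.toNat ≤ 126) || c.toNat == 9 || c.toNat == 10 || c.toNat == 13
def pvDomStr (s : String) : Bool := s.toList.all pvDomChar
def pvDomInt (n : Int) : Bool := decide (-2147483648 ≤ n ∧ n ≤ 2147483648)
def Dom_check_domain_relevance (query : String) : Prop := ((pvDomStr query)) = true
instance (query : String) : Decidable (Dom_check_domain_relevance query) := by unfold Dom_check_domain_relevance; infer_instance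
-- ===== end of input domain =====

-- B scans the lowercased query position by position, dispatching on the current character into a
-- dict grouping keywords by first letter and testing only those as prefixes there, instead of A's
-- per-keyword substring-scan loops; A's dead broad-keyword loop has no counterpart in B (alternative).


-- ===== PORT A =====
def pvAiKeywords : List String :=
  ["artificial intelligence", "ai", "machine learning", "ml", "deep learning",
   "neural network", "algorithm", "data science", "computer vision",
   "natural language processing", "nlp", "reinforcement learning", "transformer",
   "gpt", "llm", "large language model", "neural network", "supervised learning",
   "unsupervised learning", "reinforcement learning", "computer vision"]

def pvRoboticsKeywords : List String :=
  ["robotics", "robot", "automation", "actuator", "sensor", "servo",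
   "microcontroller", "arduino", "raspberry pi", "kinematics", "dynamics",
   "motion planning", "path planning", "slam", "simultaneous localization",
   "mapping", "computer vision", "robot arm", "mobile robot", "humanoid",
   "navigation", "control system", "pid controller", "ros", "robot operating system"]

def pvMlKeywords : List String :=
  ["machine learning", "ml", "deep learning", "neural network", "algorithm",
   "training", "dataset", "model", "accuracy", "precision", "recall",
   "f1 score", "overfitting", "underfitting", "cross validation", "feature",
   "classification", "regression", "clustering", "svm", "decision tree",
   "random forest", "gradient boosting", "xgboost", "tensorflow", "pytorch"]

def pvEducationKeywords : List String :=
  ["education", "learning", "course", "tutorial", "teaching", "student",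
   "curriculum", "syllabus", "academic", "scholarly", "pedagogy", "instruction",
   "knowledge", "understanding", "concept", "theory", "principle", "study",
   "research", "analysis", "methodology", "learning outcome", "competency"]

def pvBroadKeywords : List String :=
  ["technology", "programming", "coding", "software", "hardware", "computing",
   "science", "engineering", "automation", "intelligent", "autonomous",
   "algorithmic", "computation", "digital", "smart", "intelligent system"]

def check_domain_relevance (query : String) : Bool :=
  let query_lower := PySem.Str.lower query
  let all_keywords := pvAiKeywords ++ pvRoboticsKeywords ++ pvMlKeywords ++ pvEducationKeywords
  -- first for-loop: return True on the first keyword found in query_lower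
  if all_keywords.any (fun keyword => PySem.Str.isIn keyword query_lower) then true
  -- second for-loop over broad keywords with the inner any(...) context check
  else if pvBroadKeywords.any (fun keyword =>
        PySem.Str.isIn keyword query_lower &&
        (pvAiKeywords ++ pvRoboticsKeywords ++ pvMlKeywords).any
          (fun ai_keyword => PySem.Str.isIn ai_keyword query_lower)) then true
  else false

-- ===== PORT B =====
-- Source B's single flat keyword list (the four lists written out once, in order)
def pvKeywordsB : List String :=
  ["artificial intelligence", "ai", "machine learning", "ml", "deep learning",
   "neural network", "algorithm", "data science", "computer vision",
   "natural language processing", "nlp", "reinforcement learning", "transformer",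
   "gpt", "llm", "large language model", "neural network", "supervised learning",
   "unsupervised learning", "reinforcement learning", "computer vision",
   "robotics", "robot", "automation", "actuator", "sensor", "servo",
   "microcontroller", "arduino", "raspberry pi", "kinematics", "dynamics",
   "motion planning", "path planning", "slam", "simultaneous localization",
   "mapping", "computer vision", "robot arm", "mobile robot", "humanoid",
   "navigation", "control system", "pid controller", "ros", "robot operating system",
   "machine learning", "ml", "deep learning", "neural network", "algorithm",
   "training", "dataset", "model", "accuracy", "precision", "recall",
   "f1 score", "overfitting", "underfitting", "cross validation", "feature",
   "classification", "regression", "clustering", "svm", "decision tree",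
   "random forest", "gradient boosting", "xgboost", "tensorflow", "pytorch",
   "education", "learning", "course", "tutorial", "teaching", "student",
   "curriculum", "syllabus", "academic", "scholarly", "pedagogy", "instruction",
   "knowledge", "understanding", "concept", "theory", "principle", "study",
   "research", "analysis", "methodology", "learning outcome", "competency"]

-- k[0] of a keyword; exact here since every keyword in _KEYWORDS is nonempty
def pvHeadChar (k : String) : Char := k.toList.headD ' '

-- _BY_FIRST: dict grouping keywords by first character, built by the module-level loop
-- d.setdefault(k[0], []).append(k)  ==  d[k[0]] = d.get(k[0], []) + [k]  ==  Dict.modify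
def pvByFirst : PySem.Dict Char (List String) :=
  pvKeywordsB.foldl (fun d k => d.modify (pvHeadChar k) [] (fun v => v ++ [k])) PySem.Dict.empty

-- for i in range(len(q)): for k in _BY_FIRST.get(q[i], ()): if q.startswith(k, i): return True
-- q[i] ported as q.getD i ' ' (exact: i < len q); q.startswith(k, i) as startswith of q[i:] (exact: i ≤ len q)
def check_domain_relevance_alt (query : String) : Bool :=
  let q := (PySem.Str.lower query).toList
  (List.range q.length).any (fun i =>
    (pvByFirst.getD (q.getD i ' ') []).any (fun k =>
      PySem.Chars.startswith (q.drop i) k.toList))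

-- ===== PRECONDITION & SPEC =====
def Spec_check_domain_relevance (query : String) (out : Bool) : Prop := out = check_domain_relevance_alt query
instance (query : String) (out : Bool) : Decidable (Spec_check_domain_relevance query out) := by unfold Spec_check_domain_relevance; infer_instance

-- ===== CLAIM =====
def Claim_equal_check_domain_relevance : Prop := ∀ (query : String), Dom_check_domain_relevance query → Spec_check_domain_relevance query (check_domain_relevance query)

-- ===== LEMMAS AND PROOFS =====

-- A's concatenated keyword list is B's flat literal list.
theorem pvKeywords_concat :
    pvAiKeywords ++ pvRoboticsKeywords ++ pvMlKeywords ++ pvEducationKeywords = pvKeywordsB := by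
  rfl

-- every keyword is nonempty
theorem pvKeywords_ne_nil : ∀ k ∈ pvKeywordsB, k.toList ≠ [] := by decide

-- the grouping dict looked up at c is exactly the keywords whose first char is c
theorem pvByFirst_getD (c : Char) :
    pvByFirst.getD c [] = pvKeywordsB.filter (fun k => pvHeadChar k == c) := by
  have h : pvByFirst = (pvKeywordsB.map (fun k => (pvHeadChar k, k))).foldl
      (fun d p => d.modify p.1 [] (fun v => v ++ [p.2])) PySem.Dict.empty := by
    rw [List.foldl_map]; rfl
  rw [h, PySem.Dict.getD_foldl_modify_append, PySem.Dict.getD_empty, List.filter_map,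
    List.map_map]
  simp [Function.comp_def]

-- positional first-char-dispatch scan = per-keyword substring test
theorem pvScan_eq (q : List Char) :
    ((List.range q.length).any (fun i =>
        (pvKeywordsB.filter (fun k => pvHeadChar k == q.getD i ' ')).any (fun k =>
          PySem.Chars.startswith (q.drop i) k.toList)))
      = pvKeywordsB.any (fun k => PySem.Chars.isIn k.toList q) := by
  rw [Bool.eq_iff_iff]
  simp only [List.any_eq_true, List.mem_filter, List.mem_range,
    PySem.Chars.startswith_iff, beq_iff_eq]
  constructor
  · rintro ⟨i, _, k, ⟨hk, _⟩, hpre⟩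
    exact ⟨k, hk, (PySem.Chars.exists_prefix_drop_iff_isIn _ _).mp ⟨i, hpre⟩⟩
  · rintro ⟨k, hk, hin⟩
    obtain ⟨j, hpre⟩ := (PySem.Chars.exists_prefix_drop_iff_isIn _ _).mpr hin
    have hne := pvKeywords_ne_nil k hk
    obtain ⟨c, t, hk0⟩ := List.exists_cons_of_ne_nil hne
    have hlt : j < q.length := by
      by_contra hge
      have : q.drop j = [] := List.drop_eq_nil_of_le (le_of_not_gt hge)
      rw [this, List.prefix_nil] at hpre
      exact hne hpre
    refine ⟨j, hlt, k, ⟨hk, ?_⟩, hpre⟩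
    -- pvHeadChar k = q.getD j ' ' : both are the head of q.drop j
    obtain ⟨rest, hdrop⟩ := hpre
    have hq : q.getD j ' ' = (q.drop j).headD ' ' := by
      simp [List.getD_eq_getElem?_getD, List.head?_drop, List.headD_eq_head?_getD]
    rw [hq, ← hdrop, hk0]
    simp [pvHeadChar, hk0]

-- ===== VERDICT =====
theorem check_domain_relevance_spec : Claim_equal_check_domain_relevance := by
  intro query _
  unfold Spec_check_domain_relevance check_domain_relevance check_domain_relevance_alt
  dsimp only
  rw [pvKeywords_concat]
  simp only [pvByFirst_getD, PySem.Str.isIn_eq, PySem.Str.toList_lower, pvScan_eq]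
  cases h : pvKeywordsB.any (fun k => PySem.Chars.isIn k.toList (PySem.Chars.lower query.toList)) with
  | true => rfl
  | false =>
    have hsub : ((pvAiKeywords ++ pvRoboticsKeywords ++ pvMlKeywords).any
        (fun k => PySem.Chars.isIn k.toList (PySem.Chars.lower query.toList))) = false := by
      rw [List.any_eq_false]
      intro k hk
      refine List.any_eq_false.mp h k ?_
      rw [← pvKeywords_concat]
      exact List.mem_append_left _ hk
    have hb : (pvBroadKeywords.any (fun keyword =>
        PySem.Chars.isIn keyword.toList (PySem.Chars.lower query.toList) &&
        (pvAiKeywords ++ pvRoboticsKeywords ++ pvMlKeywords).any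
          (fun ai_keyword => PySem.Chars.isIn ai_keyword.toList (PySem.Chars.lower query.toList)))) = false := by
      apply List.any_eq_false.mpr
      intro k _
      rw [hsub, Bool.and_false]
      exact Bool.false_ne_true
    rw [hb]
    rfl
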